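-- pv_equiv track=rewrite | github.com/park-soeun/algorithm | 221227/words_2.py | solution
-- ===== SOURCE A (Python) =====
-- def solution(begin, target, words):
--
--     queue = []
--     visited = [0] * len(words)
--     for i in range(len(words)):
--         if words[i] == target:
--             visited[i] = 1
--             queue.append(target)
--     if target not in words:
--         return 0
--     while queue:
--         tmp = queue.pop()
--         for i in range(len(words)):
--             if words[i] == tmp:
--                 tmp_value = visited[i]
--         for i in range(len(words)):
--             if visited[i] == 0:
--                 for j in range(len(target)):
--                     if words[i][j + 1:] == tmp[j + 1:] and words[i][:j] == tmp[:j]: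
--                         visited[i] = tmp_value + 1
--                         queue.append(words[i])
--                         break
--     return max(visited)
-- ===== SOURCE B (Python) =====
-- def solution(begin, target, words):
--     # same DFS-stack labelling as the original, but one-char-wildcard buckets
--     # precomputed once replace the per-pop rescan of all word pairs
--     if target not in words:
--         return 0
--     n, L = len(words), len(target)
--     buckets = {}
--     for i in range(n):
--         w = words[i]
--         for j in range(L):
--             buckets.setdefault((w[:j], w[j + 1:]), []).append(i)
--     dist = [0] * n
--     stack = []
--     for i in range(n):
--         if words[i] == target:
--             dist[i] = 1
--             stack.append(i)
--     while stack:
--         t = stack.pop()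
--         w = words[t]
--         seen = set()
--         for j in range(L):
--             seen.update(buckets.get((w[:j], w[j + 1:]), ()))
--         step = dist[t] + 1
--         for i in sorted(seen):
--             if dist[i] == 0:
--                 dist[i] = step
--                 stack.append(i)
--     return max(dist)
-- ===== Notes on version B (the rewrite author's own statement) =====
-- stated objective: alternative
-- what changed: B precomputes one-char-wildcard (prefix,suffix) buckets once via a hash map and walks an index stack taking each pop's neighbours from the sorted bucket union, instead of A's per-pop rescan of all words for tmp_value and of every word-position pair for adjacency.
import Mathlib
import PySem

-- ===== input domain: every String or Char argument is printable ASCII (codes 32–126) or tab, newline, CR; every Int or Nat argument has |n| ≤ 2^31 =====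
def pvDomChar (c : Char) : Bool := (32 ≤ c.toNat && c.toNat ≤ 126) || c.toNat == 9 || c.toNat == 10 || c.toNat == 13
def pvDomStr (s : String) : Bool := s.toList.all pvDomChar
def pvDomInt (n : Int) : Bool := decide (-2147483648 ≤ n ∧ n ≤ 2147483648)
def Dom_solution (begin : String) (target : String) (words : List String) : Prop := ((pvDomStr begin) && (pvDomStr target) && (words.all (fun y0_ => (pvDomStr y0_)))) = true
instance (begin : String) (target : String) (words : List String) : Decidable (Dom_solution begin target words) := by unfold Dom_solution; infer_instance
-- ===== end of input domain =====

-- B replaces A's per-pop rescan of every word pair by one-char-wildcard buckets built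
-- once (hashing), keeping A's exact stack traversal; proved to return A's value everywhere.
-- Strings are ported through List Char (PySem convention); `visited` holds the Python
-- ints 0,1,2,…, modelled as Nat and cast to Int at the very end.

-- ===== PORT A =====

-- words[i][j+1:] == tmp[j+1:] and words[i][:j] == tmp[:j]
def pvMatchA (w tmp : List Char) (j : Nat) : Bool :=
  (PySem.List.slice w (some ((j : Int) + 1)) none == PySem.List.slice tmp (some ((j : Int) + 1)) none) &&
  (PySem.List.slice w none (some (j : Int)) == PySem.List.slice tmp none (some (j : Int)))

-- body of A's 'for i in range(len(words))' marking loop (the 'break' collapses the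
-- inner j-loop into 'any', whose body is the same update for every j)
def pvStepA (ws : List (List Char)) (L : Nat) (tmp : List Char) (tv : Nat)
    (s : List Nat × List (List Char)) (i : Nat) : List Nat × List (List Char) :=
  if s.1.getD i 0 == 0 then
    if (List.range L).any (fun j => pvMatchA (ws.getD i []) tmp j) then
      (s.1.set i (tv + 1), s.2 ++ [ws.getD i []])
    else s
  else s

-- 'tmp_value' scan (last i with words[i] == tmp); the 'none' default is Python's
-- unbound tmp_value, unreachable because every queued string occurs in words
def pvTmpVal (ws : List (List Char)) (vis : List Nat) (tmp : List Char) : Nat :=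
  (((List.range ws.length).foldl
      (fun acc i => if ws.getD i [] == tmp then some (vis.getD i 0) else acc)
      (none : Option Nat)).getD 0)

-- the while-loop. Recursion is on an explicit fuel counter (a totality guard only):
-- every pop was pushed, and pushes are bounded by the initial queue plus the number of
-- zero entries of visited, so the loop makes at most 2*len(words) pops; with fuel
-- 2*len(words)+1 the fuel never runs out and the loop always ends by queue exhaustion,
-- exactly like Python's while.
def pvLoopA (ws : List (List Char)) (L : Nat) : Nat → List Nat → List (List Char) → List Nat
  | 0, vis, _ => vis
  | fuel + 1, vis, queue =>
    if hq : queue = [] then vis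
    else
      pvLoopA ws L fuel
        ((List.range ws.length).foldl
          (pvStepA ws L (queue.getLast hq) (pvTmpVal ws vis (queue.getLast hq)))
          (vis, queue.dropLast)).1
        ((List.range ws.length).foldl
          (pvStepA ws L (queue.getLast hq) (pvTmpVal ws vis (queue.getLast hq)))
          (vis, queue.dropLast)).2

-- A's initial loop building visited and the queue of copies of target
def pvInitA (ws : List (List Char)) (t : List Char) : List Nat × List (List Char) :=
  (List.range ws.length).foldl
    (fun s i => if ws.getD i [] == t then (s.1.set i 1, s.2 ++ [t]) else s)
    (List.replicate ws.length 0, [])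

def solution (begin : String) (target : String) (words : List String) : Int :=
  -- begin is never used (the Python ignores it too)
  if ((words.map String.toList).contains target.toList) = false then 0
  else
    (((PySem.List.max? (pvLoopA (words.map String.toList) target.toList.length
        (2 * words.length + 1)
        (pvInitA (words.map String.toList) target.toList).1
        (pvInitA (words.map String.toList) target.toList).2) (fun x => x)).getD 0 : Nat) : Int)

-- ===== PORT B =====

-- (w[:j], w[j+1:]) — the wildcard bucket key
def pvKeyB (w : List Char) (j : Nat) : List Char × List Char :=
  (PySem.List.slice w none (some (j : Int)), PySem.List.slice w (some ((j : Int) + 1)) none)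

-- buckets: for i in range(n): for j in range(L): buckets.setdefault(key, []).append(i)
def pvBuckets (ws : List (List Char)) (L : Nat) : PySem.Dict (List Char × List Char) (List Nat) :=
  (List.range ws.length).foldl
    (fun d i => (List.range L).foldl
      (fun d j => d.modify (pvKeyB (ws.getD i []) j) [] (fun v => v ++ [i])) d)
    PySem.Dict.empty

-- seen-set accumulation: for j in range(L): seen.update(buckets.get(key, ()))
def pvSeen (b : PySem.Dict (List Char × List Char) (List Nat)) (L : Nat) (w : List Char) :
    PySem.Set Nat :=
  (List.range L).foldl
    (fun s j => (b.getD (pvKeyB w j) []).foldl (fun s i => PySem.Set.add s i) s)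
    (PySem.Set.ofList [])

-- body of B's marking loop over sorted(seen); step = dist[t] + 1 hoisted as in Source B
def pvStepB (step : Nat) (s : List Nat × List Nat) (i : Nat) : List Nat × List Nat :=
  if s.1.getD i 0 == 0 then (s.1.set i step, s.2 ++ [i]) else s

-- B's while-loop: pop, sorted wildcard neighbours via buckets, mark, push indices.
-- Same fuel counter as A's loop (a totality guard that never runs out, see pvLoopA).
def pvLoopB (ws : List (List Char)) (L : Nat)
    (b : PySem.Dict (List Char × List Char) (List Nat)) :
    Nat → List Nat → List Nat → List Nat
  | 0, dist, _ => dist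
  | fuel + 1, dist, stack =>
    if hs : stack = [] then dist
    else
      pvLoopB ws L b fuel
        ((PySem.List.sorted (pvSeen b L (ws.getD (stack.getLast hs) [])) (fun x => x)).foldl
          (pvStepB (dist.getD (stack.getLast hs) 0 + 1)) (dist, stack.dropLast)).1
        ((PySem.List.sorted (pvSeen b L (ws.getD (stack.getLast hs) [])) (fun x => x)).foldl
          (pvStepB (dist.getD (stack.getLast hs) 0 + 1)) (dist, stack.dropLast)).2

-- B's initial loop: same scan as A's but pushing indices
def pvInitB (ws : List (List Char)) (t : List Char) : List Nat × List Nat :=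
  (List.range ws.length).foldl
    (fun s i => if ws.getD i [] == t then (s.1.set i 1, s.2 ++ [i]) else s)
    (List.replicate ws.length 0, [])

def solution_alt (begin : String) (target : String) (words : List String) : Int :=
  -- begin is never used
  if ((words.map String.toList).contains target.toList) = false then 0
  else
    (((PySem.List.max? (pvLoopB (words.map String.toList) target.toList.length
        (pvBuckets (words.map String.toList) target.toList.length)
        (2 * words.length + 1)
        (pvInitB (words.map String.toList) target.toList).1
        (pvInitB (words.map String.toList) target.toList).2) (fun x => x)).getD 0 : Nat) : Int)

-- ===== PRECONDITION & SPEC =====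
def Spec_solution (begin : String) (target : String) (words : List String) (out : Int) : Prop := out = solution_alt begin target words
instance (begin : String) (target : String) (words : List String) (out : Int) : Decidable (Spec_solution begin target words out) := by unfold Spec_solution; infer_instance

-- ===== CLAIM (what is proved, stated in full; the proofs are below) =====
def Claim_equal_solution : Prop := ∀ (begin : String) (target : String) (words : List String), Dom_solution begin target words → Spec_solution begin target words (solution begin target words)

-- ===== LEMMAS AND PROOFS =====

lemma pvBuckets_getD (ws : List (List Char)) (L : Nat) (k : List Char × List Char) :
    (pvBuckets ws L).getD k []
      = (((List.range ws.length).flatMap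
            (fun i => (List.range L).map (fun j => (pvKeyB (ws.getD i []) j, i)))).filter
          (fun p => p.1 == k)).map (fun p => p.2) := by
  unfold pvBuckets
  rw [PySem.List.foldl_congr_mem _ _
      (fun d i => ((List.range L).map (fun j => (pvKeyB (ws.getD i []) j, i))).foldl
        (fun d p => d.modify p.1 [] (fun v => v ++ [p.2])) d) _
      (by intro acc i _; simp only [List.foldl_map])]
  rw [← List.foldl_flatMap, PySem.Dict.getD_foldl_modify_append]
  simp

lemma pvAdds_mem : ∀ (xs : List Nat) (s : PySem.Set Nat) (y : Nat),
    y ∈ xs.foldl (fun s i => PySem.Set.add s i) s ↔ y ∈ s ∨ y ∈ xs := by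
  intro xs
  induction xs with
  | nil => intro s y; simp
  | cons x xs ih =>
      intro s y
      rw [List.foldl_cons, ih, PySem.Set.mem_add]
      simp; tauto

lemma pvAdds_nodup : ∀ (xs : List Nat) (s : PySem.Set Nat),
    s.Nodup → (xs.foldl (fun s i => PySem.Set.add s i) s).Nodup := by
  intro xs
  induction xs with
  | nil => intro s h; exact h
  | cons x xs ih => intro s h; exact ih _ (PySem.Set.nodup_add s x h)

lemma pvSeen_mem (b : PySem.Dict (List Char × List Char) (List Nat)) (L : Nat) (w : List Char)
    (i : Nat) : i ∈ pvSeen b L w ↔ ∃ j, j ∈ List.range L ∧ i ∈ b.getD (pvKeyB w j) [] := by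
  unfold pvSeen
  have : ∀ (jl : List Nat) (s0 : PySem.Set Nat),
      (i ∈ jl.foldl (fun s j => (b.getD (pvKeyB w j) []).foldl (fun s i => PySem.Set.add s i) s) s0
        ↔ i ∈ s0 ∨ ∃ j, j ∈ jl ∧ i ∈ b.getD (pvKeyB w j) []) := by
    intro jl
    induction jl with
    | nil => intro s0; simp
    | cons j jl ih =>
        intro s0
        rw [List.foldl_cons, ih, pvAdds_mem]
        simp; tauto
  rw [this]
  simp

lemma pvSeen_nodup (b : PySem.Dict (List Char × List Char) (List Nat)) (L : Nat) (w : List Char) :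
    (pvSeen b L w).Nodup := by
  unfold pvSeen
  have : ∀ (jl : List Nat) (s0 : PySem.Set Nat), s0.Nodup →
      (jl.foldl (fun s j => (b.getD (pvKeyB w j) []).foldl (fun s i => PySem.Set.add s i) s) s0).Nodup := by
    intro jl
    induction jl with
    | nil => intro s0 h; exact h
    | cons j jl ih => intro s0 h; exact ih _ (pvAdds_nodup _ _ h)
  exact this _ _ (PySem.Set.nodup_ofList _)

-- slice bridges
lemma pvMatchA_eq (w tmp : List Char) (j : Nat) :
    pvMatchA w tmp j = true ↔ (w.drop (j + 1) = tmp.drop (j + 1) ∧ w.take j = tmp.take j) := by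
  have hcast : ((j : Int) + 1) = ((j + 1 : Nat) : Int) := by push_cast; ring
  unfold pvMatchA
  rw [hcast, PySem.List.slice_from_natCast, PySem.List.slice_from_natCast,
    PySem.List.slice_to_natCast, PySem.List.slice_to_natCast]
  simp

lemma pvKeyB_eq (w : List Char) (j : Nat) :
    pvKeyB w j = (w.take j, w.drop (j + 1)) := by
  have hcast : ((j : Int) + 1) = ((j + 1 : Nat) : Int) := by push_cast; ring
  unfold pvKeyB
  rw [hcast, PySem.List.slice_from_natCast, PySem.List.slice_to_natCast]

-- a cross-position wildcard-key collision at (j2, j) inside range L implies a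
-- same-position match
lemma pvCross (w' w : List Char) (L j j2 : Nat) (hj : j < L) (hj2 : j2 < L)
    (h1 : w'.take j2 = w.take j) (h2 : w'.drop (j2 + 1) = w.drop (j + 1)) :
    ∃ j3, j3 < L ∧ w'.take j3 = w.take j3 ∧ w'.drop (j3 + 1) = w.drop (j3 + 1) := by
  rcases Nat.lt_trichotomy j2 j with hlt | rfl | hgt
  · -- j2 < j : then w.length ≤ j2, match at j2
    have hlen := congrArg List.length h1
    simp only [List.length_take] at hlen
    have hwle : w.length ≤ j2 := by omega
    refine ⟨j2, hj2, ?_, ?_⟩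
    · rw [h1, List.take_of_length_le (by omega), List.take_of_length_le hwle]
    · have hw' : w'.drop (j2 + 1) = [] := by
        rw [h2, List.drop_eq_nil_iff]; omega
      rw [hw', Eq.comm, List.drop_eq_nil_iff]; omega
  · exact ⟨j2, hj2, h1, h2⟩
  · -- j < j2 : then w'.length ≤ j, match at j
    have hlen := congrArg List.length h1
    simp only [List.length_take] at hlen
    have hw'le : w'.length ≤ j := by omega
    refine ⟨j, hj, ?_, ?_⟩
    · rw [List.take_of_length_le hw'le, ← h1, List.take_of_length_le (by omega)]
    · have hw : w.drop (j + 1) = [] := by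
        rw [← h2, List.drop_eq_nil_iff]; omega
      rw [hw, List.drop_eq_nil_iff]; omega

lemma pvBuckets_mem (ws : List (List Char)) (L : Nat) (k : List Char × List Char) (i : Nat) :
    i ∈ (pvBuckets ws L).getD k []
      ↔ i < ws.length ∧ ∃ j, j < L ∧ pvKeyB (ws.getD i []) j = k := by
  rw [pvBuckets_getD]
  constructor
  · intro h
    obtain ⟨p, hp, rfl⟩ := List.mem_map.mp h
    obtain ⟨hpmem, hpk⟩ := List.mem_filter.mp hp
    obtain ⟨i0, hi0, hp0⟩ := List.mem_flatMap.mp hpmem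
    obtain ⟨j, hj, rfl⟩ := List.mem_map.mp hp0
    exact ⟨List.mem_range.mp hi0, j, List.mem_range.mp hj, by simpa using hpk⟩
  · rintro ⟨hi, j, hj, hk⟩
    apply List.mem_map.mpr
    refine ⟨(pvKeyB (ws.getD i []) j, i), List.mem_filter.mpr ⟨?_, by simpa using hk⟩, rfl⟩
    exact List.mem_flatMap.mpr ⟨i, List.mem_range.mpr hi,
      List.mem_map.mpr ⟨j, List.mem_range.mpr hj, rfl⟩⟩

-- the neighbour list (traversal order of both programs): index-increasing
def pvM (ws : List (List Char)) (L : Nat) (tmp : List Char) : List Nat :=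
  (List.range ws.length).filter
    (fun i => (List.range L).any (fun j => pvMatchA (ws.getD i []) tmp j))

lemma pvM_mem (ws : List (List Char)) (L : Nat) (tmp : List Char) (i : Nat) :
    i ∈ pvM ws L tmp
      ↔ i < ws.length ∧ ∃ j, j < L ∧ pvMatchA (ws.getD i []) tmp j = true := by
  unfold pvM
  simp [List.mem_filter, List.mem_range, List.any_eq_true]

lemma pvM_nodup (ws : List (List Char)) (L : Nat) (tmp : List Char) : (pvM ws L tmp).Nodup :=
  (List.nodup_range).filter _

-- K2: B's sorted neighbour set is exactly A's scan order pvM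
lemma pvSortedSeen (ws : List (List Char)) (L : Nat) (w : List Char) :
    PySem.List.sorted (pvSeen (pvBuckets ws L) L w) (fun x => x) = pvM ws L w := by
  apply PySem.List.sorted_eq_of_perm_of_pairwise_lt
  · rw [List.perm_ext_iff_of_nodup (pvM_nodup ws L w) (pvSeen_nodup _ _ _)]
    intro i
    rw [pvM_mem, pvSeen_mem]
    constructor
    · rintro ⟨hi, j, hj, hm⟩
      rw [pvMatchA_eq] at hm
      exact ⟨j, List.mem_range.mpr hj, (pvBuckets_mem ws L _ i).mpr
        ⟨hi, j, hj, by rw [pvKeyB_eq, pvKeyB_eq, hm.2, hm.1]⟩⟩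
    · rintro ⟨j, hj, hmem⟩
      rw [List.mem_range] at hj
      obtain ⟨hi, j2, hj2, hk⟩ := (pvBuckets_mem ws L _ i).mp hmem
      rw [pvKeyB_eq, pvKeyB_eq, Prod.mk.injEq] at hk
      obtain ⟨j3, hj3, h1, h2⟩ := pvCross (ws.getD i []) w L j j2 hj hj2 hk.1 hk.2
      exact ⟨hi, j3, hj3, (pvMatchA_eq _ _ _).mpr ⟨h2, h1⟩⟩
  · exact (List.pairwise_lt_range).filter _

-- characterisation of the state-independent guarded set-fold (initial loops, and the
-- visited component of the marking loops)
lemma pvGetD_set_self (w : List Nat) (i v : Nat) :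
    (w.set i v).getD i 0 = if i < w.length then v else w.getD i 0 := by
  induction w generalizing i with
  | nil => simp
  | cons a w ih =>
      cases i with
      | zero => simp
      | succ i => simpa [Nat.succ_lt_succ_iff] using ih i

lemma pvGetD_set_ne (w : List Nat) (i k v : Nat) (h : i ≠ k) :
    (w.set i v).getD k 0 = w.getD k 0 := by
  induction w generalizing i k with
  | nil => simp
  | cons a w ih =>
      cases i with
      | zero => cases k with
        | zero => exact absurd rfl h
        | succ k => simp
      | succ i => cases k with
        | zero => simp
        | succ k => simpa using ih i k (by omega)

lemma pvSetFold_getD (g : Nat → Bool) (v : Nat) :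
    ∀ (l : List Nat) (w : List Nat) (k : Nat),
      (l.foldl (fun w i => if g i then w.set i v else w) w).getD k 0
        = if k ∈ l ∧ g k = true ∧ k < w.length then v else w.getD k 0 := by
  intro l
  induction l with
  | nil => intro w k; simp
  | cons i l ih =>
      intro w k
      rw [List.foldl_cons]
      by_cases hg : g i
      · simp only [hg, if_true, ih, List.length_set]
        by_cases hk : k = i
        · subst hk
          by_cases hkw : k < w.length
          · have hv : (w.set k v).getD k 0 = v := by rw [pvGetD_set_self]; simp [hkw]
            have h1 : (if k ∈ l ∧ g k = true ∧ k < w.length then v else (w.set k v).getD k 0) = v := by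
              split_ifs with h
              · rfl
              · exact hv
            rw [h1]
            simp [hg, hkw]
          · have hv : (w.set k v).getD k 0 = w.getD k 0 := by rw [pvGetD_set_self]; simp [hkw]
            rw [hv]
            simp [hkw]
        · rw [pvGetD_set_ne w i k v (fun h => hk h.symm)]
          simp [List.mem_cons, hk]
      · simp only [hg, ih]
        by_cases hk : k = i
        · subst hk; simp [hg]
        · simp [List.mem_cons, hk]

lemma pvSetFold_length (g : Nat → Bool) (v : Nat) :
    ∀ (l : List Nat) (w : List Nat),
      (l.foldl (fun w i => if g i then w.set i v else w) w).length = w.length := by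
  intro l
  induction l with
  | nil => intro w; rfl
  | cons i l ih => intro w; rw [List.foldl_cons]; split_ifs <;> simp [ih]

-- characterisation of the initial loops (guard independent of the state)
lemma pvInit_char {α : Type} (g : Nat → Bool) (push : Nat → α) :
    ∀ (l : List Nat) (vis : List Nat) (q : List α),
      l.foldl (fun s i => if g i then (s.1.set i 1, s.2 ++ [push i]) else s) (vis, q)
        = (l.foldl (fun w i => if g i then w.set i 1 else w) vis,
           q ++ (l.filter g).map push) := by
  intro l
  induction l with
  | nil => intro vis q; simp
  | cons i l ih =>
      intro vis q
      rw [List.foldl_cons, List.foldl_cons]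
      by_cases hg : g i
      · simp only [hg, if_true]
        rw [ih]
        simp [hg]
      · simp only [hg]
        rw [ih]
        simp [hg]

-- characterisation of the marking fold (guard reads the evolving state, but each
-- index of a Nodup list is visited once, so the original visited decides everything)
lemma pvMark_char {α : Type} (push : Nat → α) (v : Nat) :
    ∀ (l : List Nat), l.Nodup → ∀ (vis : List Nat) (q : List α),
      l.foldl (fun s i => if s.1.getD i 0 == 0 then (s.1.set i v, s.2 ++ [push i]) else s) (vis, q)
        = (l.foldl (fun w i => if vis.getD i 0 == 0 then w.set i v else w) vis,
           q ++ (l.filter (fun i => vis.getD i 0 == 0)).map push) := by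
  intro l
  induction l with
  | nil => intro _ vis q; simp
  | cons i l ih =>
      intro hnd vis q
      have hndl : l.Nodup := (List.nodup_cons.mp hnd).2
      have hnmem : i ∉ l := (List.nodup_cons.mp hnd).1
      rw [List.foldl_cons, List.foldl_cons]
      have hgd : ∀ i' ∈ l, (vis.set i v).getD i' 0 = vis.getD i' 0 := by
        intro i' hi'
        exact pvGetD_set_ne vis i i' v (fun h => hnmem (h ▸ hi'))
      by_cases hg : vis.getD i 0 == 0
      · simp only [hg, if_true]
        rw [ih hndl]
        rw [PySem.List.foldl_congr_mem _ _
          (fun w i' => if vis.getD i' 0 == 0 then w.set i' v else w) _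
          (by intro acc i' hi'; rw [hgd i' hi'])]
        rw [List.filter_congr (fun i' hi' => by rw [hgd i' hi'])]
        have hg' : vis[i]?.getD 0 = 0 := by
          simpa [List.getD_eq_getElem?_getD] using hg
        simp [hg', List.append_assoc]
      · simp only [hg]
        rw [ih hndl]
        have hg' : ¬ vis[i]?.getD 0 = 0 := by
          simpa [List.getD_eq_getElem?_getD] using hg
        simp [hg']

-- instance of pvMark_char for B's step function
lemma pvMark_charB (v : Nat) (l : List Nat) (hnd : l.Nodup) (vis : List Nat) (q : List Nat) :
    l.foldl (pvStepB v) (vis, q)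
      = (l.foldl (fun w i => if vis.getD i 0 == 0 then w.set i v else w) vis,
         q ++ l.filter (fun i => vis.getD i 0 == 0)) := by
  have h := pvMark_char (fun i : Nat => i) v l hnd vis q
  have hstep : (fun (s : List Nat × List Nat) (i : Nat) =>
      if s.1.getD i 0 == 0 then (s.1.set i v, s.2 ++ [(fun i : Nat => i) i]) else s) = pvStepB v := by
    funext s i; simp [pvStepB]
  rw [hstep] at h
  simpa using h

-- A's tmp_value scan returns visited[t] whenever equal words carry equal visited
lemma pvTmpVal_eq (ws : List (List Char)) (vis : List Nat) (t : Nat) (ht : t < ws.length)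
    (h4 : ∀ i, i < ws.length → ws.getD i [] = ws.getD t [] → vis.getD i 0 = vis.getD t 0) :
    pvTmpVal ws vis (ws.getD t []) = vis.getD t 0 := by
  have aux : ∀ (l : List Nat) (acc : Option Nat),
      (∀ i ∈ l, i < ws.length) →
      ((t ∈ l) ∨ acc = some (vis.getD t 0)) →
      l.foldl (fun acc i => if ws.getD i [] == ws.getD t [] then some (vis.getD i 0) else acc) acc
        = some (vis.getD t 0) := by
    intro l
    induction l with
    | nil =>
        intro acc _ h
        rcases h with h | h
        · simp at h
        · simpa using h
    | cons i l ih =>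
        intro acc hb h
        rw [List.foldl_cons]
        by_cases hil : t ∈ l
        · exact ih _ (fun x hx => hb x (List.mem_cons_of_mem _ hx)) (Or.inl hil)
        · have hacc : (if ws.getD i [] == ws.getD t [] then some (vis.getD i 0) else acc)
              = some (vis.getD t 0) := by
            rcases h with h | h
            · have hit : i = t := by
                rcases List.mem_cons.mp h with h' | h'
                · exact h'.symm
                · exact absurd h' hil
              subst hit
              simp
            · by_cases hw : ws.getD i [] == ws.getD t []
              · have heq : ws.getD i [] = ws.getD t [] := by simpa using hw
                have hv := h4 i (hb i (List.mem_cons_self ..)) heq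
                simp only [List.getD_eq_getElem?_getD] at heq hv
                simp [heq, hv]
              · have hne : ¬ (ws.getD i [] = ws.getD t []) := by simpa using hw
                simp only [List.getD_eq_getElem?_getD] at hne
                simp [hne, h]
          exact ih _ (fun x hx => hb x (List.mem_cons_of_mem _ hx)) (Or.inr hacc)
  unfold pvTmpVal
  rw [aux (List.range ws.length) none (fun i hi => List.mem_range.mp hi)
    (Or.inl (List.mem_range.mpr ht))]
  rfl

-- the two loops run in lockstep: A's queue is the word image of B's index stack
lemma pvLoop_sim (ws : List (List Char)) (L : Nat) :
    ∀ (fuel : Nat) (vis : List Nat) (st : List Nat), vis.length = ws.length →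
      (∀ i ∈ st, i < ws.length) →
      (∀ i j : Nat, i < ws.length → j < ws.length →
        ws.getD i [] = ws.getD j [] → vis.getD i 0 = vis.getD j 0) →
      pvLoopA ws L fuel vis (st.map (fun i => ws.getD i []))
        = pvLoopB ws L (pvBuckets ws L) fuel vis st := by
  intro fuel
  induction fuel with
  | zero => intro vis st _ _ _; rfl
  | succ N ih =>
      intro vis st hlen hst h4
      by_cases hst0 : st = []
      · subst hst0
        rw [pvLoopA, pvLoopB]
        simp
      · obtain ⟨ys, a, hst_eq⟩ := (List.eq_nil_or_concat st).resolve_left hst0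
        rw [List.concat_eq_append] at hst_eq
        subst hst_eq
        have ha : a < ws.length := hst a (by simp)
        have htv : pvTmpVal ws vis (ws.getD a []) = vis.getD a 0 :=
          pvTmpVal_eq ws vis a ha (fun i hi hw => h4 i a hi ha hw)
        rw [pvLoopA, pvLoopB]
        rw [dif_neg (by simp : ¬((ys ++ [a]).map (fun i => ws.getD i []) = ([] : List (List Char))))]
        rw [dif_neg hst0]
        simp only [List.map_append, List.map_cons, List.map_nil, List.getLast_concat,
          List.dropLast_concat, htv]
        -- A's scan-and-mark step over range n collapses to a mark over pvM
        have hS : (List.range ws.length).foldl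
            (pvStepA ws L (ws.getD a []) (vis.getD a 0)) (vis, ys.map (fun i => ws.getD i []))
            = ((pvM ws L (ws.getD a [])).foldl
                (fun w i => if vis.getD i 0 == 0 then w.set i (vis.getD a 0 + 1) else w) vis,
               ((ys ++ (pvM ws L (ws.getD a [])).filter (fun i => vis.getD i 0 == 0)).map
                  (fun i => ws.getD i []))) := by
          rw [PySem.List.foldl_congr_mem _ _
              (fun (s : List Nat × List (List Char)) i =>
                if (List.range L).any (fun j => pvMatchA (ws.getD i []) (ws.getD a []) j)
                then (if s.1.getD i 0 == 0
                      then (s.1.set i (vis.getD a 0 + 1), s.2 ++ [ws.getD i []]) else s)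
                else s) _
              (by intro acc i _
                  unfold pvStepA
                  beta_reduce
                  split_ifs <;> rfl)]
          rw [PySem.List.foldl_if_eq_foldl_filter
              (fun i => (List.range L).any (fun j => pvMatchA (ws.getD i []) (ws.getD a []) j))
              (fun (s : List Nat × List (List Char)) i =>
                if s.1.getD i 0 == 0
                then (s.1.set i (vis.getD a 0 + 1), s.2 ++ [ws.getD i []]) else s)]
          rw [show (List.range ws.length).filter
              (fun i => (List.range L).any (fun j => pvMatchA (ws.getD i []) (ws.getD a []) j))
              = pvM ws L (ws.getD a []) from rfl]
          rw [List.map_append]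
          exact pvMark_char (fun i => ws.getD i []) (vis.getD a 0 + 1) _ (pvM_nodup ws L _) vis _
        -- B's sorted bucket-union step is the same mark over pvM
        have hT : (PySem.List.sorted (pvSeen (pvBuckets ws L) L (ws.getD a [])) (fun x => x)).foldl
            (pvStepB (vis.getD a 0 + 1)) (vis, ys)
            = ((pvM ws L (ws.getD a [])).foldl
                (fun w i => if vis.getD i 0 == 0 then w.set i (vis.getD a 0 + 1) else w) vis,
               ys ++ (pvM ws L (ws.getD a [])).filter (fun i => vis.getD i 0 == 0)) := by
          rw [pvSortedSeen]
          exact pvMark_charB (vis.getD a 0 + 1) _ (pvM_nodup ws L _) vis ys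
        -- invariants for the recursive call
        have hlenV : ((pvM ws L (ws.getD a [])).foldl
            (fun w i => if vis.getD i 0 == 0 then w.set i (vis.getD a 0 + 1) else w) vis).length
              = ws.length := by
          rw [pvSetFold_length]; exact hlen
        have hgV : ∀ k, ((pvM ws L (ws.getD a [])).foldl
            (fun w i => if vis.getD i 0 == 0 then w.set i (vis.getD a 0 + 1) else w) vis).getD k 0
              = if k ∈ pvM ws L (ws.getD a []) ∧ (vis.getD k 0 == 0) = true ∧ k < vis.length
                then vis.getD a 0 + 1 else vis.getD k 0 :=
          fun k => pvSetFold_getD _ _ _ _ _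
        have hstV : ∀ i ∈ ys ++ (pvM ws L (ws.getD a [])).filter (fun i => vis.getD i 0 == 0),
            i < ws.length := by
          intro i hi
          rcases List.mem_append.mp hi with h | h
          · exact hst i (List.mem_append_left _ h)
          · exact ((pvM_mem ws L _ i).mp (List.mem_filter.mp h).1).1
        have h4V : ∀ i j, i < ws.length → j < ws.length → ws.getD i [] = ws.getD j [] →
            ((pvM ws L (ws.getD a [])).foldl
              (fun w i => if vis.getD i 0 == 0 then w.set i (vis.getD a 0 + 1) else w) vis).getD i 0
              = ((pvM ws L (ws.getD a [])).foldl
                  (fun w i => if vis.getD i 0 == 0 then w.set i (vis.getD a 0 + 1) else w) vis).getD j 0 := by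
          intro i j hi hj hw
          rw [hgV i, hgV j]
          have hmm : i ∈ pvM ws L (ws.getD a []) ↔ j ∈ pvM ws L (ws.getD a []) := by
            rw [pvM_mem, pvM_mem, hw]
            simp [hi, hj]
          have hvv := h4 i j hi hj hw
          rw [hvv]
          by_cases hc : j ∈ pvM ws L (ws.getD a []) ∧ (vis.getD j 0 == 0) = true ∧ j < vis.length
          · rw [if_pos hc, if_pos ⟨hmm.mpr hc.1, hc.2.1, by rw [hlen]; exact hi⟩]
          · rw [if_neg hc, if_neg (fun hic => hc ⟨hmm.mp hic.1, hic.2.1, by rw [hlen]; exact hj⟩)]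
        have hrec := ih ((pvM ws L (ws.getD a [])).foldl
            (fun w i => if vis.getD i 0 == 0 then w.set i (vis.getD a 0 + 1) else w) vis)
          (ys ++ (pvM ws L (ws.getD a [])).filter (fun i => vis.getD i 0 == 0))
          hlenV hstV h4V
        simp only [hS, hT]
        exact hrec

-- both loops receive equal initial states
lemma pvMain (ws : List (List Char)) (t : List Char) (fuel : Nat) :
    pvLoopA ws t.length fuel (pvInitA ws t).1 (pvInitA ws t).2
      = pvLoopB ws t.length (pvBuckets ws t.length) fuel (pvInitB ws t).1 (pvInitB ws t).2 := by
  have hA : pvInitA ws t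
      = ((List.range ws.length).foldl
          (fun w i => if ws.getD i [] == t then w.set i 1 else w) (List.replicate ws.length 0),
         ((List.range ws.length).filter (fun i => ws.getD i [] == t)).map
           (fun i => ws.getD i [])) := by
    unfold pvInitA
    rw [pvInit_char (fun i => ws.getD i [] == t) (fun _ => t)]
    rw [List.map_congr_left
      (fun i hi => by
        have : (ws.getD i [] == t) = true := (List.mem_filter.mp hi).2
        simpa using (eq_of_beq this).symm)]
    simp
  have hB : pvInitB ws t
      = ((List.range ws.length).foldl
          (fun w i => if ws.getD i [] == t then w.set i 1 else w) (List.replicate ws.length 0),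
         (List.range ws.length).filter (fun i => ws.getD i [] == t)) := by
    unfold pvInitB
    rw [pvInit_char (fun i => ws.getD i [] == t) (fun i => i)]
    simp
  have hlen0 : ((List.range ws.length).foldl
      (fun w i => if ws.getD i [] == t then w.set i 1 else w)
      (List.replicate ws.length 0)).length = ws.length := by
    rw [pvSetFold_length]; simp
  have hst0 : ∀ i ∈ (List.range ws.length).filter (fun i => ws.getD i [] == t),
      i < ws.length := by
    intro i hi
    exact List.mem_range.mp (List.mem_filter.mp hi).1
  have h40 : ∀ i j : Nat, i < ws.length → j < ws.length → ws.getD i [] = ws.getD j [] →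
      ((List.range ws.length).foldl
        (fun w i => if ws.getD i [] == t then w.set i 1 else w)
        (List.replicate ws.length 0)).getD i 0
      = ((List.range ws.length).foldl
          (fun w i => if ws.getD i [] == t then w.set i 1 else w)
          (List.replicate ws.length 0)).getD j 0 := by
    intro i j hi hj hw
    rw [pvSetFold_getD, pvSetFold_getD]
    simp only [List.mem_range, List.length_replicate, hw]
    have hrep : ∀ k : Nat, (List.replicate ws.length (0 : Nat)).getD k 0 = 0 := by
      intro k
      by_cases hk : k < ws.length
      · simp [List.getD_eq_getElem?_getD, hk]
      · simp [List.getD_eq_getElem?_getD, hk]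
    rw [hrep i, hrep j]
    by_cases hc : j < ws.length ∧ (ws.getD j [] == t) = true ∧ j < ws.length
    · rw [if_pos hc, if_pos ⟨hi, hc.2.1, hi⟩]
    · rw [if_neg hc, if_neg (fun hic => hc ⟨hj, hic.2.1, hj⟩)]
  have hsim := pvLoop_sim ws t.length fuel
    ((List.range ws.length).foldl
      (fun w i => if ws.getD i [] == t then w.set i 1 else w) (List.replicate ws.length 0))
    ((List.range ws.length).filter (fun i => ws.getD i [] == t))
    hlen0 hst0 h40
  simp only [hA, hB]
  exact hsim

-- ===== VERDICT (by name: the statement is the Claim_ definition above) =====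
theorem solution_spec : Claim_equal_solution := by
  intro begin target words _
  unfold Spec_solution solution solution_alt
  by_cases hc : ((words.map String.toList).contains target.toList) = false
  · rw [if_pos hc, if_pos hc]
  · rw [if_neg hc, if_neg hc, pvMain]
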